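-- pv_equiv track=rewrite | github.com/yodabytz/diffanywhere | diffany.py | add_context
-- ===== SOURCE A (Python) =====
-- def add_context(diff_lines, context):
--     result = []
--     buffer = []
--     context_counter = 0
--     for line in diff_lines:
--         if line.startswith(('  ', '? ')):
--             if context_counter < context:
--                 buffer.append(line)
--                 context_counter += 1
--         else:
--             if buffer:
--                 result.extend(buffer)
--                 buffer = []
--                 context_counter = 0
--             result.append(line)
--     return result
-- ===== SOURCE B (Python) =====
-- def add_context(diff_lines, context):
--     # Run-based scan: each maximal run of context lines contributes its first
--     # `context` lines, and only when a change line follows it; change lines pass through.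
--     result = []
--     n = len(diff_lines)
--     i = 0
--     while i < n:
--         if diff_lines[i].startswith(('  ', '? ')):
--             j = i
--             while j < n and diff_lines[j].startswith(('  ', '? ')):
--                 j += 1
--             if j < n and context > 0:
--                 result.extend(diff_lines[i:min(j, i + context)])
--             i = j
--         else:
--             result.append(diff_lines[i])
--             i += 1
--     return result
-- ===== Notes on version B (the rewrite author's own statement) =====
-- stated objective: alternative
-- what changed: B scans maximal runs of context lines by index and emits each run's first `context` lines only when a change line follows, instead of A's buffer-accumulate-then-flush state machine.
import Mathlib
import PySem

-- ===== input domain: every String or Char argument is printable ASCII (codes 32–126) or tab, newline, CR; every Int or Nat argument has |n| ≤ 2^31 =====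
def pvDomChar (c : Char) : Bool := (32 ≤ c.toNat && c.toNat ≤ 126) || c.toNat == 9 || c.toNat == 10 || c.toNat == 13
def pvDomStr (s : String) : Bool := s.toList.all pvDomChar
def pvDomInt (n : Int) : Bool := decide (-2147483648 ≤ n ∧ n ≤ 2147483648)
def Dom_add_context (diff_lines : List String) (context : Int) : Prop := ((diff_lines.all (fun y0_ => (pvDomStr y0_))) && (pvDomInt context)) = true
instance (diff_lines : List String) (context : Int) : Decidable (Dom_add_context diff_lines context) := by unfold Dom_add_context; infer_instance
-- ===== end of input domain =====

-- B replaces A's buffer-and-flush accumulation by a run-based scan (emit each maximal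
-- run of context lines capped at `context`, only when a change line follows); same cost;
-- return-value equivalence proved.


-- ===== PORT A =====
-- line.startswith(('  ', '? ')) : startswith with a tuple is the disjunction of the prefixes
def isCtx (line : String) : Bool :=
  PySem.Str.startswith line "  " || PySem.Str.startswith line "? "

-- A's loop body over the state (result, buffer, context_counter)
def stepA (context : Int) (st : List String × List String × Int) (line : String) :
    List String × List String × Int :=
  if isCtx line then
    if st.2.2 < context then (st.1, st.2.1 ++ [line], st.2.2 + 1) else st
  else
    if st.2.1 ≠ [] then (st.1 ++ st.2.1 ++ [line], [], 0)
    else (st.1 ++ [line], st.2.1, st.2.2)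

def add_context (diff_lines : List String) (context : Int) : List String :=
  (diff_lines.foldl (stepA context) ([], [], 0)).1

-- ===== PORT B =====
-- B's while loop over index i; the inner while loop computing j (end of the maximal run
-- of context lines) is ported as takeWhile/dropWhile on the remaining list — exact, since
-- diff_lines[i:j] is the maximal isCtx-prefix of the remainder; the slice
-- diff_lines[i:min(j, i+context)] with context > 0 is run.take context.toNat.
def goB (context : Int) : List String → List String
  | [] => []
  | l :: ls =>
    if h : isCtx l then
      let run := List.takeWhile isCtx (l :: ls)
      let rest := List.dropWhile isCtx (l :: ls)
      (if !rest.isEmpty && 0 < context then run.take context.toNat else []) ++ goB context rest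
    else
      l :: goB context ls
termination_by ls => ls.length
decreasing_by
  · simp only [List.dropWhile_cons, h, if_true]
    exact Nat.lt_succ_of_le (List.length_dropWhile_le _ _)
  · simp

def add_context_alt (diff_lines : List String) (context : Int) : List String :=
  goB context diff_lines

-- ===== PRECONDITION & SPEC =====
def Spec_add_context (diff_lines : List String) (context : Int) (out : List String) : Prop := out = add_context_alt diff_lines context
instance (diff_lines : List String) (context : Int) (out : List String) : Decidable (Spec_add_context diff_lines context out) := by unfold Spec_add_context; infer_instance

-- ===== CLAIM (what is proved, stated in full; the proofs are below) =====
def Claim_equal_add_context : Prop := ∀ (diff_lines : List String) (context : Int), Dom_add_context diff_lines context → Spec_add_context diff_lines context (add_context diff_lines context)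

-- ===== LEMMAS AND PROOFS =====

-- the tail A's fold still produces from remaining input ls with buffer b, counter c
def restA (context : Int) : List String → List String → Int → List String
  | [], _, _ => []
  | l :: ls, b, c =>
    if isCtx l then
      if c < context then restA context ls (b ++ [l]) (c + 1) else restA context ls b c
    else
      b ++ [l] ++ restA context ls [] 0

lemma foldA_eq_restA (context : Int) (ls : List String) :
    ∀ (r b : List String) (c : Int), c = (b.length : Int) →
    (ls.foldl (stepA context) (r, b, c)).1 = r ++ restA context ls b c := by
  induction ls with
  | nil => intro r b c _; simp [restA]
  | cons l ls ih =>
    intro r b c hc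
    by_cases hl : isCtx l
    · by_cases hcnt : c < context
      · simpa [stepA, hl, hcnt, restA] using ih r (b ++ [l]) (c + 1) (by simp [hc])
      · simpa [stepA, hl, hcnt, restA] using ih r b c hc
    · have hstep : stepA context (r, b, c) l = (r ++ b ++ [l], [], 0) := by
        by_cases hb : b = []
        · subst hb
          simp only [List.length_nil, Int.natCast_zero] at hc
          simp [stepA, hl, hc]
        · simp [stepA, hl, hb]
      simp only [List.foldl_cons, hstep, restA, hl]
      rw [ih (r ++ b ++ [l]) [] 0 (by simp)]
      simp

-- running restA through a run of context lines caps the buffer extension at `context`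
lemma restA_run (context : Int) (run : List String) :
    ∀ (ls' b : List String), (∀ x ∈ run, isCtx x = true) →
    restA context (run ++ ls') b (b.length : Int) =
      restA context ls' (b ++ run.take (context - b.length).toNat)
        ((b ++ run.take (context - b.length).toNat).length : Int) := by
  induction run with
  | nil => intro ls' b _; simp
  | cons x run ih =>
    intro ls' b hall
    have hx : isCtx x = true := hall x (by simp)
    simp only [List.cons_append, restA, hx, if_true]
    by_cases hcnt : (b.length : Int) < context
    · have h1 : (context - (b.length : Int)).toNat = (context - ((b ++ [x]).length : Int)).toNat + 1 := by
        simp only [List.length_append, List.length_cons, List.length_nil]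
        omega
      have := ih ls' (b ++ [x]) (fun y hy => hall y (by simp [hy]))
      rw [if_pos hcnt]
      have hc1 : ((b.length : Int) + 1) = (((b ++ [x]).length : Int)) := by simp
      rw [hc1, this, h1]
      simp [List.take_succ_cons]
    · have h0 : (context - (b.length : Int)).toNat = 0 := by omega
      rw [if_neg hcnt, h0]
      have := ih ls' b (fun y hy => hall y (by simp [hy]))
      have h0' : (context - (b.length : Int)).toNat = 0 := h0
      simpa [h0'] using this

lemma take_toNat_nonpos (context : Int) (h : ¬ 0 < context) (l : List String) :
    l.take context.toNat = ([] : List String) := by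
  have : context.toNat = 0 := by omega
  simp [this]

lemma goB_nil (context : Int) : goB context [] = [] := by rw [goB]

lemma goB_cons_neg (context : Int) (l : String) (ls : List String) (h : isCtx l = false) :
    goB context (l :: ls) = l :: goB context ls := by
  rw [goB]; simp [h]

lemma goB_cons_pos (context : Int) (l : String) (ls : List String) (h : isCtx l = true) :
    goB context (l :: ls) =
      (if !(List.dropWhile isCtx (l :: ls)).isEmpty && 0 < context then
        (List.takeWhile isCtx (l :: ls)).take context.toNat else [])
        ++ goB context (List.dropWhile isCtx (l :: ls)) := by
  rw [goB]; simp [h]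

lemma restA_eq_goB (context : Int) (ls : List String) :
    restA context ls [] 0 = goB context ls := by
  induction hn : ls.length using Nat.strong_induction_on generalizing ls with
  | _ n ih =>
    match ls with
    | [] => simp [restA, goB_nil]
    | l :: ls =>
      have hn' : ls.length + 1 = n := by simpa using hn
      by_cases hl : isCtx l
      · have hall : ∀ x ∈ List.takeWhile isCtx (l :: ls), isCtx x = true :=
          fun x hx => List.mem_takeWhile_imp hx
        have hsplit : List.takeWhile isCtx (l :: ls) ++ List.dropWhile isCtx (l :: ls) = l :: ls :=
          List.takeWhile_append_dropWhile
        have hrest : List.dropWhile isCtx (l :: ls) = List.dropWhile isCtx ls := by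
          simp [hl]
        have hrun : restA context (l :: ls) [] 0 =
            restA context (List.dropWhile isCtx (l :: ls))
              ((List.takeWhile isCtx (l :: ls)).take context.toNat)
              (((List.takeWhile isCtx (l :: ls)).take context.toNat).length : Int) := by
          have h0 := restA_run context (List.takeWhile isCtx (l :: ls))
            (List.dropWhile isCtx (l :: ls)) [] hall
          rw [hsplit] at h0
          simpa using h0
        rw [hrun, goB_cons_pos context l ls hl]
        cases hdw : List.dropWhile isCtx (l :: ls) with
        | nil => simp [restA, goB_nil]
        | cons r rs =>
          have hr : isCtx r = false := by
            have := List.head?_dropWhile_not isCtx (l :: ls)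
            rw [hdw] at this; simpa using this
          have hlen : rs.length < n := by
            rw [hrest] at hdw
            have h1 : (List.dropWhile isCtx ls).length ≤ ls.length := List.length_dropWhile_le _ _
            have h2 := congrArg List.length hdw
            simp at h2
            omega
          have hr' : ¬ isCtx r = true := by simp [hr]
          rw [restA]
          simp only [hr]
          rw [goB_cons_neg context r rs hr, ih rs.length hlen rs rfl]
          by_cases hc : 0 < context
          · simp [hc]
          · simp [hc, take_toNat_nonpos context hc]
      · have hlen : ls.length < n := by omega
        rw [restA]
        simp only [if_neg hl]
        rw [goB_cons_neg context l ls (by simpa using hl), ih ls.length hlen ls rfl]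
        simp

-- ===== VERDICT (by name: the statement is the Claim_ definition above) =====
theorem add_context_spec : Claim_equal_add_context := by
  intro diff_lines context _
  show add_context diff_lines context = add_context_alt diff_lines context
  unfold add_context add_context_alt
  rw [foldA_eq_restA context diff_lines [] [] 0 (by simp)]
  simpa using restA_eq_goB context diff_lines
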